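-- pv_equiv track=rewrite | github.com/jhgalino/MPv2 | include/MPEv2.py | getParentheses
-- ===== SOURCE A (Python) =====
-- def getParentheses(function: str):
--     assert type(function) == str, "type(function) == str"
--     assert function.count("(") >= 1, "function.count('(') >= 1"
--     assert function.count(")") >= 1, "function.count(')') >= 1"
--
--     startCounter = 0
--     endCounter = 0
--     functionList = list(function)
--     for n in range(len(functionList)):
--         if startCounter < 1 and functionList[n] == "(":
--             functionList[n] = "~"
--             startCounter += 1
--     for n in range(len(functionList) - 1, -1, -1):
--         if endCounter < 1 and functionList[n] == ")":
--             functionList[n] = "~"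
--             endCounter += 1
--     functionList = "".join(functionList)
--     return functionList
-- ===== SOURCE B (Python) =====
-- def getParentheses(function: str):
--     assert type(function) == str, "type(function) == str"
--     assert function.count("(") >= 1, "function.count('(') >= 1"
--     assert function.count(")") >= 1, "function.count(')') >= 1"
--
--     i = function.find("(")
--     j = function.rfind(")")
--     function = function[:i] + "~" + function[i + 1:]
--     return function[:j] + "~" + function[j + 1:]
-- ===== Notes on version B (the rewrite author's own statement) =====
-- stated objective: idiomatic
-- what changed: Replaces the two counter-guarded full scans over a mutable list copy with find/rfind index lookups and pure string slicing; no list conversion or join.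
-- outside the precondition, e.g. on getParentheses('('): A raises AssertionError, B raises AssertionError; on getParentheses(')'): A raises AssertionError, B raises AssertionError
import Mathlib
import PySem

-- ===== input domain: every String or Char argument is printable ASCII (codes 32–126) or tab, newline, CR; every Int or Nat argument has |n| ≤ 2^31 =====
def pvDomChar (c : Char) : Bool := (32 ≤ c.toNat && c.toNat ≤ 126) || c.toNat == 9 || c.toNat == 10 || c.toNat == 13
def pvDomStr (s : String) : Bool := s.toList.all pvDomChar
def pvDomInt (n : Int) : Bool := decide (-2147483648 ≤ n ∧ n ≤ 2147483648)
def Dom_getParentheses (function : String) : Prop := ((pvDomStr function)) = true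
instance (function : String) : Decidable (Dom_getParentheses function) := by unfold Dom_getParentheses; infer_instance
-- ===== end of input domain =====

-- B replaces A's two counter-guarded scans over a list copy by find/rfind plus slicing (idiomatic decomposition; same behaviour on Pre_).


-- ===== PORT A =====
-- A's forward loop: walks the whole list, replacing a '(' by '~' while startCounter < 1.
def pvReplFirst (t : Char) (cs : List Char) (counter : Int) : List Char :=
  match cs with
  | [] => []
  | c :: rest =>
    if counter < 1 ∧ c = t then '~' :: pvReplFirst t rest (counter + 1)
    else c :: pvReplFirst t rest counter

-- A's backward index loop is transcribed as the same guarded scan over the reversed list.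
def getParentheses (function : String) : String :=
  let functionList := function.toList
  let functionList := pvReplFirst '(' functionList 0
  let functionList := (pvReplFirst ')' functionList.reverse 0).reverse
  String.ofList functionList

-- ===== PORT B =====
def getParentheses_alt (function : String) : String :=
  let s := function.toList
  let i := PySem.Chars.find s ['(']
  let j := PySem.Chars.rfind s [')']
  let s := PySem.List.slice s none (some i) ++ '~' :: PySem.List.slice s (some (i + 1)) none
  String.ofList (PySem.List.slice s none (some j) ++ '~' :: PySem.List.slice s (some (j + 1)) none)

-- ===== PRECONDITION & SPEC =====
-- A's asserts: the string must contain at least one '(' and one ')' (A raises AssertionError otherwise).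
def Pre_getParentheses (function : String) : Prop :=
  1 ≤ PySem.Str.count function "(" ∧ 1 ≤ PySem.Str.count function ")"
instance (function : String) : Decidable (Pre_getParentheses function) := by
  unfold Pre_getParentheses; infer_instance
def pvWitness_getParentheses : String := "(x)"

def Spec_getParentheses (function : String) (out : String) : Prop := out = getParentheses_alt function
instance (function : String) (out : String) : Decidable (Spec_getParentheses function out) := by unfold Spec_getParentheses; infer_instance

-- ===== CLAIM (what is proved, stated in full; the proofs are below) =====
def Claim_equal_getParentheses : Prop := ∀ (function : String), Dom_getParentheses function → Pre_getParentheses function → Spec_getParentheses function (getParentheses function)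

-- ===== LEMMAS AND PROOFS =====

-- [c].isPrefixOf l / [c] <+: l means l starts with c
theorem pv_singleton_prefix_iff (c : Char) (l : List Char) :
    [c] <+: l ↔ l.head? = some c := by
  cases l with
  | nil => simp
  | cons a t => simp [List.cons_prefix_cons, eq_comm]

theorem pv_singleton_isPrefixOf (c : Char) (l : List Char) :
    [c].isPrefixOf l = true ↔ l.head? = some c := by
  rw [List.isPrefixOf_iff_prefix, pv_singleton_prefix_iff]

theorem pv_head?_drop (l : List Char) (k : Nat) : (l.drop k).head? = l[k]? := by
  simp [List.head?_drop]

-- count.go on a one-character needle counts that character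
theorem pv_count_go_singleton (c : Char) (fuel : Nat) :
    ∀ (l : List Char) (acc : Nat), l.length ≤ fuel →
      PySem.Chars.count.go [c] fuel l acc = acc + l.count c := by
  induction fuel with
  | zero =>
    intro l acc h
    have hl : l = [] := List.eq_nil_of_length_eq_zero (by omega)
    subst hl
    rfl
  | succ n ih =>
    intro l acc h
    cases l with
    | nil => simp [PySem.Chars.count.go]
    | cons a t =>
      simp only [PySem.Chars.count.go]
      by_cases hc : a = c
      · subst hc
        rw [if_pos (by simp [List.isPrefixOf])]
        simp only [List.length_cons] at h
        simp only [List.length_cons, List.length_nil, List.drop_succ_cons, List.drop_zero]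
        rw [ih t (acc + 1) (by omega)]
        simp
        omega
      · rw [if_neg (by simp [List.isPrefixOf]; exact fun h' => hc h'.symm)]
        simp only [List.length_cons] at h
        rw [ih t acc (by omega)]
        simp [hc]

theorem pv_count_singleton (c : Char) (l : List Char) :
    PySem.Chars.count l [c] = l.count c := by
  simp [PySem.Chars.count, pv_count_go_singleton c l.length l 0 le_rfl]

-- rfind.go returns the highest matching start position
theorem pv_rfind_go_eq (c : Char) (s : List Char) (m j : Nat)
    (hj : j ≤ m) (hjc : s[j]? = some c)
    (hmax : ∀ k, j < k → k ≤ m → s[k]? ≠ some c) :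
    PySem.Chars.rfind.go s [c] m = (j : Int) := by
  induction m with
  | zero =>
    have : j = 0 := by omega
    subst this
    simp only [PySem.Chars.rfind.go]
    rw [if_pos (by rw [pv_singleton_isPrefixOf, List.head?_eq_getElem?]; exact hjc)]
    simp
  | succ n ih =>
    simp only [PySem.Chars.rfind.go]
    by_cases hp : [c].isPrefixOf (s.drop (n + 1)) = true
    · rw [if_pos hp]
      rw [pv_singleton_isPrefixOf, pv_head?_drop] at hp
      have : j = n + 1 := by
        by_contra hne
        exact hmax (n + 1) (by omega) le_rfl hp
      simp [this]
    · rw [if_neg hp]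
      rw [pv_singleton_isPrefixOf, pv_head?_drop] at hp
      have hjn : j ≤ n := by
        rcases Nat.lt_or_ge j (n + 1) with h | h
        · omega
        · have : j = n + 1 := by omega
          subst this; exact absurd hjc hp
      exact ih hjn (fun k hk hkn => hmax k hk (by omega))

-- A's guarded scan with counter already 1 changes nothing
theorem pv_replFirst_one (t : Char) (l : List Char) : pvReplFirst t l 1 = l := by
  induction l with
  | nil => rfl
  | cons a r ih => simp [pvReplFirst, ih]

-- A's guarded scan replaces exactly the first occurrence
theorem pv_replFirst_spec (t : Char) (l : List Char) (i : Nat)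
    (hi : l[i]? = some t) (hmin : ∀ k, k < i → l[k]? ≠ some t) :
    pvReplFirst t l 0 = l.take i ++ '~' :: l.drop (i + 1) := by
  induction l generalizing i with
  | nil => simp at hi
  | cons a r ih =>
    by_cases ha : a = t
    · have hi0 : i = 0 := by
        by_contra hne
        exact hmin 0 (by omega) (by simp [ha])
      subst hi0; subst ha
      simp [pvReplFirst, pv_replFirst_one]
    · have hne : i ≠ 0 := by
        intro h; subst h; simp at hi; exact ha hi
      obtain ⟨i', rfl⟩ : ∃ i', i = i' + 1 := ⟨i - 1, by omega⟩
      have hi' : r[i']? = some t := by simpa using hi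
      have hmin' : ∀ k, k < i' → r[k]? ≠ some t := by
        intro k hk
        have := hmin (k + 1) (by omega)
        simpa using this
      have hstep : pvReplFirst t (a :: r) 0 = a :: pvReplFirst t r 0 := by
        simp only [pvReplFirst]
        rw [if_neg (by rintro ⟨-, h⟩; exact ha h)]
      rw [hstep, ih i' hi' hmin']
      simp

-- elementwise description of the surgery  take i ++ '~' :: drop (i+1)
theorem pv_getElem?_surgery (l : List Char) (x : Char) (i : Nat) (hi : i < l.length) (k : Nat) :
    (l.take i ++ x :: l.drop (i + 1))[k]? = if k = i then some x else l[k]? := by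
  by_cases hk : k < i
  · rw [if_neg (by omega)]
    rw [List.getElem?_append_left (by simp; omega)]
    simp [hk]
  · rw [List.getElem?_append_right (by simp; omega)]
    have hlen : (l.take i).length = i := by simp; omega
    rw [hlen]
    by_cases hke : k = i
    · subst hke; simp
    · rw [if_neg hke]
      obtain ⟨d, hd⟩ : ∃ d, k - i = d + 1 := ⟨k - i - 1, by omega⟩
      rw [hd]
      simp only [List.getElem?_cons_succ, List.getElem?_drop]
      congr 1; omega

theorem pv_length_surgery (l : List Char) (x : Char) (i : Nat) (hi : i < l.length) :
    (l.take i ++ x :: l.drop (i + 1)).length = l.length := by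
  simp; omega

-- reversing the surgery on the reversed list is the surgery at the mirrored index
theorem pv_reverse_surgery (l : List Char) (x : Char) (j : Nat) (hj : j < l.length) :
    (l.reverse.take (l.length - 1 - j) ++ x :: l.reverse.drop (l.length - 1 - j + 1)).reverse
      = l.take j ++ x :: l.drop (j + 1) := by
  have hj' : l.length - 1 - j < l.reverse.length := by simp; omega
  have hlen : (l.reverse.take (l.length - 1 - j) ++ x :: l.reverse.drop (l.length - 1 - j + 1)).length = l.length := by
    have := pv_length_surgery l.reverse x (l.length - 1 - j) hj'
    simpa using this
  apply List.ext_getElem?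
  intro k
  by_cases hk : k < l.length
  · rw [List.getElem?_reverse (by rw [hlen]; exact hk), hlen]
    rw [pv_getElem?_surgery l.reverse x (l.length - 1 - j) hj']
    rw [pv_getElem?_surgery l x j hj]
    by_cases hkj : k = j
    · subst hkj
      rw [if_pos (by omega), if_pos rfl]
    · rw [if_neg (by omega), if_neg hkj]
      rw [List.getElem?_reverse (by omega)]
      congr 1; omega
  · have e1 : (l.reverse.take (l.length - 1 - j) ++ x :: l.reverse.drop (l.length - 1 - j + 1)).reverse[k]? = none :=
      List.getElem?_eq_none (by rw [List.length_reverse, hlen]; omega)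
    rw [e1, List.getElem?_eq_none (by simp; omega)]

-- main equivalence on the list level
theorem pv_main (s : List Char) (h1 : '(' ∈ s) (h2 : ')' ∈ s) :
    (pvReplFirst ')' (pvReplFirst '(' s 0).reverse 0).reverse
      = (let i := PySem.Chars.find s ['(']
         let j := PySem.Chars.rfind s [')']
         let t := PySem.List.slice s none (some i) ++ '~' :: PySem.List.slice s (some (i + 1)) none
         PySem.List.slice t none (some j) ++ '~' :: PySem.List.slice t (some (j + 1)) none) := by
  -- the index of the first '('
  have hfind0 : 0 ≤ PySem.Chars.find s ['('] := by
    rw [PySem.Chars.find_nonneg_iff]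
    obtain ⟨u, v, rfl⟩ := List.append_of_mem h1
    exact ⟨u, v, by simp⟩
  set i : Nat := (PySem.Chars.find s ['(']).toNat with hidef
  have hcast : PySem.Chars.find s ['('] = (i : Int) := (Int.toNat_of_nonneg hfind0).symm
  obtain ⟨hpre, hminp⟩ := PySem.Chars.find_spec hfind0
  rw [pv_singleton_prefix_iff, pv_head?_drop] at hpre
  have hi : s[i]? = some '(' := hpre
  have hmin : ∀ k, k < i → s[k]? ≠ some '(' := by
    intro k hk hkc
    exact hminp k hk (by rw [pv_singleton_prefix_iff, pv_head?_drop]; exact hkc)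
  have hilen : i < s.length := by
    by_contra hc
    rw [List.getElem?_eq_none (by omega)] at hi
    simp at hi
  -- the index of the last ')'
  set j : Nat := Nat.findGreatest (fun k => s[k]? = some ')') (s.length - 1) with hjdef
  obtain ⟨m, hmlt, hms⟩ := List.getElem_of_mem h2
  have hPm : s[m]? = some ')' := by rw [List.getElem?_eq_getElem hmlt, hms]
  have hPj : s[j]? = some ')' := by
    rw [hjdef]
    exact Nat.findGreatest_spec (m := m) (n := s.length - 1)
      (P := fun k => s[k]? = some ')') (by omega) hPm
  have hjlen : j < s.length := by
    by_contra hc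
    rw [List.getElem?_eq_none (by omega)] at hPj
    simp at hPj
  have hmax : ∀ k, j < k → s[k]? ≠ some ')' := by
    intro k hk
    by_cases hkl : k ≤ s.length - 1
    · exact Nat.findGreatest_is_greatest (P := fun k => s[k]? = some ')')
        (n := s.length - 1) (by rw [hjdef] at hk; exact hk) hkl
    · rw [List.getElem?_eq_none (by omega)]
      simp
  have hrfind : PySem.Chars.rfind s [')'] = (j : Int) := by
    unfold PySem.Chars.rfind
    exact pv_rfind_go_eq ')' s s.length j (by omega) hPj (fun k hk _ => hmax k hk)
  have hij : i ≠ j := by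
    intro h
    rw [h, hPj] at hi
    simp at hi
  -- A's first loop is the surgery at i
  have hA1 : pvReplFirst '(' s 0 = s.take i ++ '~' :: s.drop (i + 1) :=
    pv_replFirst_spec '(' s i hi hmin
  set s1 : List Char := s.take i ++ '~' :: s.drop (i + 1) with hs1def
  have hs1len : s1.length = s.length := pv_length_surgery s '~' i hilen
  have hs1elem : ∀ k, s1[k]? = if k = i then some '~' else s[k]? :=
    fun k => pv_getElem?_surgery s '~' i hilen k
  -- ')' occurrences in s1 are those of s
  have hs1P : s1[j]? = some ')' := by rw [hs1elem, if_neg (fun h => hij h.symm)]; exact hPj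
  -- A's second loop is the surgery at the mirrored index of s1.reverse
  have hi2 : s1.reverse[s.length - 1 - j]? = some ')' := by
    rw [List.getElem?_reverse (by rw [hs1len]; omega), hs1len]
    have : s.length - 1 - (s.length - 1 - j) = j := by omega
    rw [this]; exact hs1P
  have hi2min : ∀ k, k < s.length - 1 - j → s1.reverse[k]? ≠ some ')' := by
    intro k hk
    rw [List.getElem?_reverse (by rw [hs1len]; omega), hs1len]
    rw [hs1elem]
    by_cases hki : s.length - 1 - k = i
    · rw [if_pos hki]; simp
    · rw [if_neg hki]; exact hmax _ (by omega)
  have hA2 : pvReplFirst ')' s1.reverse 0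
      = s1.reverse.take (s1.length - 1 - j) ++ '~' :: s1.reverse.drop (s1.length - 1 - j + 1) := by
    rw [hs1len]
    exact pv_replFirst_spec ')' s1.reverse (s.length - 1 - j) hi2 hi2min
  -- assemble
  have ht : PySem.List.slice s none (some (PySem.Chars.find s ['('])) ++
      '~' :: PySem.List.slice s (some (PySem.Chars.find s ['('] + 1)) none = s1 := by
    rw [hcast, PySem.List.slice_to_natCast,
        show ((i : Int) + 1) = ((i + 1 : Nat) : Int) from by push_cast; ring,
        PySem.List.slice_from_natCast, hs1def]
  have hB : PySem.List.slice s1 none (some (PySem.Chars.rfind s [')'])) ++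
      '~' :: PySem.List.slice s1 (some (PySem.Chars.rfind s [')'] + 1)) none
        = s1.take j ++ '~' :: s1.drop (j + 1) := by
    rw [hrfind, PySem.List.slice_to_natCast,
        show ((j : Int) + 1) = ((j + 1 : Nat) : Int) from by push_cast; ring,
        PySem.List.slice_from_natCast]
  rw [hA1, hA2, pv_reverse_surgery s1 '~' j (by rw [hs1len]; exact hjlen)]
  show s1.take j ++ '~' :: s1.drop (j + 1) =
      PySem.List.slice (PySem.List.slice s none (some (PySem.Chars.find s ['('])) ++
          '~' :: PySem.List.slice s (some (PySem.Chars.find s ['('] + 1)) none) none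
          (some (PySem.Chars.rfind s [')'])) ++
        '~' :: PySem.List.slice (PySem.List.slice s none (some (PySem.Chars.find s ['('])) ++
          '~' :: PySem.List.slice s (some (PySem.Chars.find s ['('] + 1)) none)
          (some (PySem.Chars.rfind s [')'] + 1)) none
  rw [ht, hB]

-- count ≥ 1 means the character occurs
theorem pv_pre_mem (s : String) (h : Pre_getParentheses s) :
    '(' ∈ s.toList ∧ ')' ∈ s.toList := by
  obtain ⟨h1, h2⟩ := h
  rw [PySem.Str.count_eq] at h1 h2
  have e1 : ("(" : String).toList = ['('] := rfl
  have e2 : (")" : String).toList = [')'] := rfl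
  rw [e1, pv_count_singleton] at h1
  rw [e2, pv_count_singleton] at h2
  exact ⟨List.count_pos_iff.mp (by omega), List.count_pos_iff.mp (by omega)⟩

-- ===== VERDICT (by name: the statement is the Claim_ definition above) =====
theorem getParentheses_spec : Claim_equal_getParentheses := by
  intro f _ hpre
  obtain ⟨h1, h2⟩ := pv_pre_mem f hpre
  unfold Spec_getParentheses getParentheses getParentheses_alt
  simp only []
  rw [pv_main f.toList h1 h2]
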